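-- pv_equiv track=rewrite | github.com/hader239/poker-agent | backend/src/poker_sim/cards.py | _straight_high
-- ===== SOURCE A (Python) =====
-- from typing import Iterable, Sequence
--
-- def _straight_high(ranks: Sequence[int]) -> int | None:
--     unique_ranks = set(ranks)
--     if 14 in unique_ranks:
--         unique_ranks.add(1)
--     ordered = sorted(unique_ranks)
--
--     run = 1
--     best = None
--     for index in range(1, len(ordered)):
--         if ordered[index] == ordered[index - 1] + 1:
--             run += 1
--             if run >= 5:
--                 best = ordered[index]
--         else:
--             run = 1
--     return best
-- ===== SOURCE B (Python) =====
-- def _straight_high(ranks):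
--     present = set(ranks)
--     if 14 in present:
--         present.add(1)
--     best = None
--     for r in present:
--         if all(r - k in present for k in range(1, 5)):
--             if best is None or r > best:
--                 best = r
--     return best
-- ===== Notes on version B (the rewrite author's own statement) =====
-- stated objective: idiomatic
-- what changed: Drops the sort and the run-length counter: B builds the same set (with ace-low 1 added) and, for each rank r present, tests whether r-1..r-4 are all present, keeping the maximum qualifying r.
import Mathlib
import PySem

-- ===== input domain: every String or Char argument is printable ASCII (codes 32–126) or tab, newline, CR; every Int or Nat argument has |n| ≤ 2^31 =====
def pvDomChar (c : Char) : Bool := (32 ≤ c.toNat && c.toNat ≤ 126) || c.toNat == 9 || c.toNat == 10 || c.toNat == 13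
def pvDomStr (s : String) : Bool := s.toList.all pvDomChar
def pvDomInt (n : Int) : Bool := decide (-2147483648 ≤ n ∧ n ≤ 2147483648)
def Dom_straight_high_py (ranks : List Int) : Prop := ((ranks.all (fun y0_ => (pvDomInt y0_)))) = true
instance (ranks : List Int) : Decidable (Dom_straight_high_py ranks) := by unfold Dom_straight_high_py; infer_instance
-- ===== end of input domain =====

-- B drops A's sort + run-length counter: it tests, for each rank present, whether the four
-- ranks below it are present too, and keeps the maximum qualifying rank (same set, ace-low 1 added).

-- ===== PORT A =====
def straight_high_py (ranks : List Int) : Option Int :=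
  let unique0 : PySem.Set Int := PySem.Set.ofList ranks
  let unique : PySem.Set Int :=
    if PySem.Set.contains unique0 14 then PySem.Set.add unique0 1 else unique0
  let ordered : List Int := PySem.List.sorted unique (fun x => x) false
  ((PySem.List.pyRange 1 (PySem.List.len ordered) 1).foldl
    (fun (st : Int × Option Int) index =>
      if PySem.List.pyGetD ordered index 0 = PySem.List.pyGetD ordered (index - 1) 0 + 1 then
        (st.1 + 1, if 5 ≤ st.1 + 1 then some (PySem.List.pyGetD ordered index 0) else st.2)
      else (1, st.2))
    (1, none)).2

-- ===== PORT B =====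
def straight_high_py_alt (ranks : List Int) : Option Int :=
  let present0 : PySem.Set Int := PySem.Set.ofList ranks
  let present : PySem.Set Int :=
    if PySem.Set.contains present0 14 then PySem.Set.add present0 1 else present0
  present.foldl
    (fun (best : Option Int) r =>
      if (PySem.List.pyRange 1 5 1).all (fun k => PySem.Set.contains present (r - k)) then
        match best with
        | none => some r
        | some b => if b < r then some r else some b
      else best)
    none

-- ===== PRECONDITION & SPEC =====
def Spec_straight_high_py (ranks : List Int) (out : Option Int) : Prop := out = straight_high_py_alt ranks
instance (ranks : List Int) (out : Option Int) : Decidable (Spec_straight_high_py ranks out) := by unfold Spec_straight_high_py; infer_instance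

-- ===== CLAIM (what is proved, stated in full; the proofs are below) =====
def Claim_equal_straight_high_py : Prop := ∀ (ranks : List Int), Dom_straight_high_py ranks → Spec_straight_high_py ranks (straight_high_py ranks)

-- ===== LEMMAS AND PROOFS =====

/-- "r-1, r-2, r-3, r-4 all occur in s" — the straight-qualification test, as a Bool. -/
def memq (s : List Int) (r : Int) : Bool :=
  decide (r - 1 ∈ s ∧ r - 2 ∈ s ∧ r - 3 ∈ s ∧ r - 4 ∈ s)

/-- A's loop body, on the pair (previous element, current element). -/
def stepP : (Int × Option Int) → (Int × Int) → (Int × Option Int) :=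
  fun st p =>
    if p.2 = p.1 + 1 then (st.1 + 1, if 5 ≤ st.1 + 1 then some p.2 else st.2)
    else (1, st.2)

/-- Length of the maximal consecutive run at the FRONT of a (reversed) list. -/
def streakR : List Int → Int
  | [] => 1
  | [_] => 1
  | x :: y :: t => if x = y + 1 then streakR (y :: t) + 1 else 1

/-- A's `best` after the whole scan, computed on the reversed ordered list. -/
def bestR : List Int → Option Int
  | [] => none
  | [_] => none
  | x :: y :: t => if x = y + 1 ∧ 5 ≤ streakR (y :: t) + 1 then some x else bestR (y :: t)

/-- max-accumulator used to describe B's fold. -/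
def mxOpt : Option Int → Int → Option Int :=
  fun best r => match best with | none => some r | some b => some (max b r)

theorem streakR_pos (l : List Int) : 1 ≤ streakR l := by
  induction l with
  | nil => simp [streakR]
  | cons x t ih =>
    cases t with
    | nil => simp [streakR]
    | cons y t' =>
      rw [streakR]
      split <;> omega

theorem zipmap (L : List Int) :
    (PySem.List.pyRange 1 (PySem.List.len L) 1).map
        (fun j => (PySem.List.pyGetD L (j - 1) 0, PySem.List.pyGetD L j 0))
      = L.zip L.tail := by
  apply List.ext_getElem
  · simp [PySem.List.length_pyRange_one, PySem.List.len]
  · intro i h1 h2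
    have hi : i + 1 < L.length := by
      simp [PySem.List.length_pyRange_one, PySem.List.len] at h1
      omega
    rw [List.getElem_map, PySem.List.getElem_pyRange_one, List.getElem_zip, List.getElem_tail]
    have e1 : (1 : Int) + (i : Int) - 1 = ((i : Nat) : Int) := by omega
    have e2 : (1 : Int) + (i : Int) = (((i + 1 : Nat)) : Int) := by omega
    rw [e1, e2, PySem.List.pyGetD_natCast, PySem.List.pyGetD_natCast,
      List.getD_eq_getElem _ _ (by omega), List.getD_eq_getElem _ _ hi]

theorem zip_concat_left (D M : List Int) (g : Int) (h : D.length = M.length) :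
    (D ++ [g]).zip M = D.zip M := by
  rw [show M = M ++ ([] : List Int) from (List.append_nil M).symm, List.zip_append h]
  simp

theorem zip_concat_both (D M : List Int) (g x : Int) (h : D.length = M.length) :
    ((D ++ [g]) ++ [x]).zip (M ++ [x]) = D.zip M ++ [(g, x)] := by
  rw [List.append_assoc, List.zip_append h]
  rfl

theorem foldzip (L : List Int) :
    (L.zip L.tail).foldl stepP (1, none) = (streakR L.reverse, bestR L.reverse) := by
  induction L using List.reverseRecOn with
  | nil => rfl
  | append_singleton M x ih =>
    cases M with
    | nil => rfl
    | cons m M' =>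
      have hne : (m :: M') ≠ [] := by simp
      obtain ⟨D, g, hDg⟩ : ∃ D g, m :: M' = D ++ [g] :=
        ⟨_, _, (List.dropLast_concat_getLast hne).symm⟩
      have hlen : D.length = M'.length := by
        have := congrArg List.length hDg
        simp at this
        omega
      have hrev : (m :: M').reverse = g :: D.reverse := by rw [hDg]; simp
      have hzip2 : ((m :: M') ++ [x]).zip (((m :: M') ++ [x]).tail)
          = (m :: M').zip (m :: M').tail ++ [(g, x)] := by
        rw [show ((m :: M') ++ [x]).tail = M' ++ [x] from rfl,
          show (m :: M').tail = M' from rfl]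
        conv_lhs => rw [hDg]
        rw [zip_concat_both D M' g x hlen]
        conv_rhs => rw [hDg, zip_concat_left D M' g hlen]
      rw [hzip2, List.foldl_append, ih, List.foldl_cons, List.foldl_nil,
        List.reverse_append, List.reverse_singleton, List.singleton_append, hrev]
      by_cases hc : x = g + 1
      · simp [stepP, streakR, bestR, hc]
      · simp [stepP, streakR, bestR, hc]

theorem mem_le_head (y : Int) (t : List Int) (h : (y :: t).Pairwise (· > ·))
    (a : Int) (ha : a ∈ y :: t) : a ≤ y := by
  rcases List.mem_cons.1 ha with rfl | ha
  · exact le_refl _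
  · exact le_of_lt ((List.pairwise_cons.1 h).1 a ha)

theorem streak_iff (t : List Int) (y : Int) (h : (y :: t).Pairwise (· > ·)) (k : Nat) :
    ((k : Int) + 1 ≤ streakR (y :: t)) ↔ ∀ j : Nat, j ≤ k → y - (j : Int) ∈ y :: t := by
  induction t generalizing y k with
  | nil =>
    simp only [streakR]
    constructor
    · intro h1 j hj
      have hk : k = 0 := by omega
      have hj0 : j = 0 := by omega
      simp [hj0]
    · intro hall
      by_contra hk
      have hk1 : 1 ≤ k := by omega
      have h1 := hall 1 hk1
      simp at h1
  | cons z t' ih =>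
    have hzt : (z :: t').Pairwise (· > ·) := (List.pairwise_cons.1 h).2
    have hyz : y > z := (List.pairwise_cons.1 h).1 z (by simp)
    rw [streakR]
    by_cases hc : y = z + 1
    · rw [if_pos hc]
      cases k with
      | zero =>
        have := streakR_pos (z :: t')
        constructor
        · intro _ j hj
          have hj0 : j = 0 := by omega
          simp [hj0]
        · intro _
          push_cast
          omega
      | succ k' =>
        have hstep : ((k' + 1 : Nat) : Int) + 1 ≤ streakR (z :: t') + 1
            ↔ ((k' : Nat) : Int) + 1 ≤ streakR (z :: t') := by push_cast; omega
        rw [hstep, ih z hzt k']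
        constructor
        · intro hall j hj
          cases j with
          | zero => simp
          | succ j' =>
            have hmem := hall j' (by omega)
            have he : y - ((j' + 1 : Nat) : Int) = z - (j' : Nat) := by push_cast; omega
            rw [he]
            exact List.mem_cons_of_mem _ hmem
        · intro hall j hj
          have hmem := hall (j + 1) (by omega)
          have he : y - ((j + 1 : Nat) : Int) = z - (j : Nat) := by push_cast; omega
          rw [he] at hmem
          rcases List.mem_cons.1 hmem with heq | hmem'
          · omega
          · exact hmem'
    · rw [if_neg hc]
      constructor
      · intro h1 j hj
        have hj0 : j = 0 := by omega
        simp [hj0]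
      · intro hall
        by_contra hk
        have h1 := hall 1 (by omega)
        push_cast at h1
        rcases List.mem_cons.1 h1 with heq | h1'
        · omega
        · have := mem_le_head z t' hzt _ h1'
          omega

theorem find?_congr_mem {l : List Int} {p q : Int → Bool}
    (h : ∀ a ∈ l, p a = q a) : l.find? p = l.find? q := by
  induction l with
  | nil => rfl
  | cons a t ih =>
    rw [List.find?_cons, List.find?_cons, h a (by simp)]
    cases hqa : q a
    · exact ih (fun b hb => h b (by simp [hb]))
    · rfl

theorem memq_mono (x : Int) (s : List Int) (r : Int) (hr : r < x) :
    memq (x :: s) r = memq s r := by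
  simp only [memq, List.mem_cons, decide_eq_decide]
  have n1 : ¬(r - 1 = x) := by omega
  have n2 : ¬(r - 2 = x) := by omega
  have n3 : ¬(r - 3 = x) := by omega
  have n4 : ¬(r - 4 = x) := by omega
  tauto

theorem bestR_eq_find (R : List Int) (h : R.Pairwise (· > ·)) :
    bestR R = R.find? (memq R) := by
  induction R with
  | nil => rfl
  | cons x t ih =>
    cases t with
    | nil =>
      have hm : memq [x] x = false := by
        simp only [memq, List.mem_singleton, decide_eq_false_iff_not]
        omega
      rw [bestR, List.find?_cons_of_neg (by simp [hm]), List.find?_nil]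
    | cons y t' =>
      have hp : (y :: t').Pairwise (· > ·) := (List.pairwise_cons.1 h).2
      have hxy : x > y := (List.pairwise_cons.1 h).1 y (by simp)
      have key : memq (x :: y :: t') x = true ↔ (x = y + 1 ∧ 5 ≤ streakR (y :: t') + 1) := by
        simp only [memq, decide_eq_true_iff]
        constructor
        · rintro ⟨h1, h2, h3, h4⟩
          have hx1 : x = y + 1 := by
            rcases List.mem_cons.1 h1 with heq | hm
            · omega
            · have := mem_le_head y t' hp _ hm
              omega
          refine ⟨hx1, ?_⟩
          have hstreak := (streak_iff t' y hp 3).1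
          have hall : ∀ j : Nat, j ≤ 3 → y - (j : Int) ∈ y :: t' := by
            intro j hj
            interval_cases j
            · simp
            · have : y - ((1 : Nat) : Int) = x - 2 := by push_cast; omega
              rw [this]
              rcases List.mem_cons.1 h2 with heq | hm
              · omega
              · exact hm
            · have : y - ((2 : Nat) : Int) = x - 3 := by push_cast; omega
              rw [this]
              rcases List.mem_cons.1 h3 with heq | hm
              · omega
              · exact hm
            · have : y - ((3 : Nat) : Int) = x - 4 := by push_cast; omega
              rw [this]
              rcases List.mem_cons.1 h4 with heq | hm
              · omega
              · exact hm
          have := (streak_iff t' y hp 3).2 hall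
          push_cast at this
          omega
        · rintro ⟨hxe, hs⟩
          have hall := (streak_iff t' y hp 3).1 (by push_cast; omega)
          have m0 := hall 0 (by omega)
          have m1 := hall 1 (by omega)
          have m2 := hall 2 (by omega)
          have m3 := hall 3 (by omega)
          push_cast at m0 m1 m2 m3
          refine ⟨?_, ?_, ?_, ?_⟩
          · have : x - 1 = y - 0 := by omega
            rw [this]
            exact List.mem_cons_of_mem _ m0
          · have : x - 2 = y - 1 := by omega
            rw [this]
            exact List.mem_cons_of_mem _ m1
          · have : x - 3 = y - 2 := by omega
            rw [this]
            exact List.mem_cons_of_mem _ m2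
          · have : x - 4 = y - 3 := by omega
            rw [this]
            exact List.mem_cons_of_mem _ m3
      rw [bestR]
      by_cases hm : memq (x :: y :: t') x = true
      · rw [if_pos (key.1 hm), List.find?_cons_of_pos hm]
      · rw [if_neg (fun hcond => hm (key.2 hcond)), List.find?_cons_of_neg hm, ih hp]
        exact find?_congr_mem (fun a ha =>
          (memq_mono x (y :: t') a (lt_of_le_of_lt (mem_le_head y t' hp a ha) hxy)).symm)

theorem memq_congr (s s' : List Int) (h : ∀ a, a ∈ s ↔ a ∈ s') : memq s = memq s' := by
  funext r
  simp only [memq, decide_eq_decide]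
  rw [h, h, h, h]

theorem getLast?_eq_max?_of_pairwise_le (l : List Int) (h : l.Pairwise (· ≤ ·)) :
    l.getLast? = l.max? := by
  induction l with
  | nil => rfl
  | cons a t ih =>
    cases t with
    | nil => rfl
    | cons b t' =>
      have hab : a ≤ b := (List.pairwise_cons.1 h).1 b (by simp)
      rw [List.getLast?_cons_cons, ih (List.pairwise_cons.1 h).2,
        List.max?_cons', List.max?_cons', List.foldl_cons, max_eq_right hab]

theorem foldl_mxOpt_some (t : List Int) (b : Int) :
    t.foldl mxOpt (some b) = some (t.foldl max b) := by
  induction t generalizing b with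
  | nil => rfl
  | cons a t ih => simp only [List.foldl_cons, mxOpt]; exact ih (max b a)

theorem foldl_mxOpt_eq_max? (l : List Int) : l.foldl mxOpt none = l.max? := by
  cases l with
  | nil => rfl
  | cons a t =>
    rw [List.foldl_cons, show mxOpt none a = some a from rfl, foldl_mxOpt_some, List.max?_cons']

theorem max?_perm {l l' : List Int} (h : l.Perm l') : l.max? = l'.max? := by
  rcases h1 : l.max? with _ | a
  · rw [List.max?_eq_none_iff] at h1
    subst h1
    rw [List.max?_eq_none_iff.2 (List.perm_nil.1 h.symm)]
  · rcases h2 : l'.max? with _ | b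
    · rw [List.max?_eq_none_iff] at h2
      subst h2
      exact absurd (List.perm_nil.1 h) (by rintro rfl; simp at h1)
    · obtain ⟨ha1, ha2⟩ := List.max?_eq_some_iff.1 h1
      obtain ⟨hb1, hb2⟩ := List.max?_eq_some_iff.1 h2
      have : a = b := le_antisymm (hb2 a (h.mem_iff.1 ha1)) (ha2 b (h.mem_iff.2 hb1))
      rw [this]

theorem pairwise_lt_of_sorted_nodup (S : List Int) (hnd : S.Nodup) :
    (PySem.List.sorted S (fun x => x) false).Pairwise (· < ·) := by
  have h1 := PySem.List.sorted_pairwise S (fun x => x)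
  have h2 : (PySem.List.sorted S (fun x => x) false).Nodup :=
    (PySem.List.sorted_perm S (fun x => x) false).nodup_iff.2 hnd
  exact (h1.and h2).imp (fun hab => lt_of_le_of_ne hab.1 hab.2)

theorem all_contains_eq_memq (S : List Int) (r : Int) :
    ((PySem.List.pyRange 1 5 1).all (fun k => PySem.Set.contains S (r - k))) = memq S r := by
  rw [show PySem.List.pyRange 1 5 1 = [1, 2, 3, 4] from rfl, Bool.eq_iff_iff]
  simp only [List.all_cons, List.all_nil, Bool.and_eq_true, PySem.Set.contains_iff,
    memq, decide_eq_true_iff]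
  tauto

theorem core_eq (S : List Int) (hnd : S.Nodup) :
    ((PySem.List.pyRange 1 (PySem.List.len (PySem.List.sorted S (fun x => x) false)) 1).foldl
      (fun (st : Int × Option Int) index =>
        if PySem.List.pyGetD (PySem.List.sorted S (fun x => x) false) index 0
            = PySem.List.pyGetD (PySem.List.sorted S (fun x => x) false) (index - 1) 0 + 1 then
          (st.1 + 1, if 5 ≤ st.1 + 1 then
            some (PySem.List.pyGetD (PySem.List.sorted S (fun x => x) false) index 0) else st.2)
        else (1, st.2))
      (1, none)).2
    = S.foldl
        (fun (best : Option Int) r =>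
          if (PySem.List.pyRange 1 5 1).all (fun k => PySem.Set.contains S (r - k)) then
            match best with
            | none => some r
            | some b => if b < r then some r else some b
          else best)
        none := by
  set L := PySem.List.sorted S (fun x => x) false with hL
  have hplt : L.Pairwise (· < ·) := pairwise_lt_of_sorted_nodup S hnd
  have hA1 : (fun (st : Int × Option Int) (index : Int) =>
      if PySem.List.pyGetD L index 0 = PySem.List.pyGetD L (index - 1) 0 + 1 then
        (st.1 + 1, if 5 ≤ st.1 + 1 then some (PySem.List.pyGetD L index 0) else st.2)
      else ((1 : Int), st.2))
      = (fun st index =>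
          stepP st ((fun j => (PySem.List.pyGetD L (j - 1) 0, PySem.List.pyGetD L j 0)) index)) :=
    rfl
  rw [hA1, ← List.foldl_map, zipmap L, foldzip L]
  have hrevp : L.reverse.Pairwise (· > ·) := List.pairwise_reverse.2 hplt
  rw [show (streakR L.reverse, bestR L.reverse).2 = bestR L.reverse from rfl,
    bestR_eq_find _ hrevp, memq_congr L.reverse L (fun a => List.mem_reverse),
    ← List.head?_filter, List.filter_reverse, List.head?_reverse,
    getLast?_eq_max?_of_pairwise_le _ ((hplt.filter _).imp (fun h => le_of_lt h)),
    memq_congr L S (fun a => by rw [hL]; exact PySem.List.mem_sorted S _ false a),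
    max?_perm ((by rw [hL]; exact (PySem.List.sorted_perm S _ false).filter _ :
      (L.filter (memq S)).Perm (S.filter (memq S))))]
  have hB1 : (fun (best : Option Int) (r : Int) =>
      if (PySem.List.pyRange 1 5 1).all (fun k => PySem.Set.contains S (r - k)) then
        match best with
        | none => some r
        | some b => if b < r then some r else some b
      else best)
      = (fun best r => if memq S r then mxOpt best r else best) := by
    funext best r
    rw [all_contains_eq_memq]
    by_cases hq : memq S r
    · rw [if_pos hq, if_pos hq]
      cases best with
      | none => rfl
      | some b =>
        show (if b < r then some r else some b) = some (max b r)
        rcases le_or_gt r b with hle | hlt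
        · rw [if_neg (not_lt.2 hle), max_eq_left hle]
        · rw [if_pos hlt, max_eq_right hlt.le]
    · rw [if_neg hq, if_neg hq]
  rw [hB1, ← List.foldl_filter, foldl_mxOpt_eq_max?]

-- ===== VERDICT (by name: the statement is the Claim_ definition above) =====
theorem straight_high_py_spec : Claim_equal_straight_high_py := by
  intro ranks _
  unfold Spec_straight_high_py straight_high_py straight_high_py_alt
  have hnd : (if PySem.Set.contains (PySem.Set.ofList ranks) 14
      then PySem.Set.add (PySem.Set.ofList ranks) 1 else PySem.Set.ofList ranks).Nodup := by
    split
    · exact PySem.Set.nodup_add _ _ (PySem.Set.nodup_ofList ranks)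
    · exact PySem.Set.nodup_ofList ranks
  exact core_eq _ hnd
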